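-- pv_equiv track=rewrite | github.com/AAlmqvist/AoC2023 | day18/main.py | digOut
-- ===== SOURCE A (Python) =====
-- def digOut(inst: list[int,int]) -> tuple[list[int,int,int],list[int,int,int]]:
--     x, y = 0, 0
--     vert = []
--     horiz = []
--     for dir, num in inst:
--         match dir:
--             case 'U':
--                 vert.append((x, y-num, y, 1))
--                 y -= num
--             case 'D':
--                 vert.append((x, y, y+num, 0))
--                 y += num
--             case 'R':
--                 horiz.append((y, x, x+num))
--                 x += num
--             case 'L':
--                 horiz.append((y, x-num, x))
--                 x -= num
--     return vert, horiz
-- ===== SOURCE B (Python) =====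
-- def digOut(inst):
--     # pass 1: ordered vertex list visited by the path, starting at (0, 0)
--     pts = [(0, 0)]
--     x, y = 0, 0
--     for dir, num in inst:
--         if dir == 'U':
--             y -= num
--         elif dir == 'D':
--             y += num
--         elif dir == 'R':
--             x += num
--         elif dir == 'L':
--             x -= num
--         pts.append((x, y))
--     # pass 2: turn consecutive vertex pairs into segments (direction kept for flag/orientation)
--     vert = []
--     horiz = []
--     for (d, _), (x0, y0), (x1, y1) in zip(inst, pts, pts[1:]):
--         if d == 'U':
--             vert.append((x0, y1, y0, 1))
--         elif d == 'D':
--             vert.append((x0, y0, y1, 0))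
--         elif d == 'R':
--             horiz.append((y0, x0, x1))
--         elif d == 'L':
--             horiz.append((y0, x1, x0))
--     return vert, horiz
-- ===== Notes on version B (the rewrite author's own statement) =====
-- stated objective: alternative
-- what changed: B splits A's single stateful loop into two passes: first build the ordered vertex list of the path, then derive each vertical/horizontal segment from consecutive vertex pairs (keeping the instruction direction for orientation).
import Mathlib
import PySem

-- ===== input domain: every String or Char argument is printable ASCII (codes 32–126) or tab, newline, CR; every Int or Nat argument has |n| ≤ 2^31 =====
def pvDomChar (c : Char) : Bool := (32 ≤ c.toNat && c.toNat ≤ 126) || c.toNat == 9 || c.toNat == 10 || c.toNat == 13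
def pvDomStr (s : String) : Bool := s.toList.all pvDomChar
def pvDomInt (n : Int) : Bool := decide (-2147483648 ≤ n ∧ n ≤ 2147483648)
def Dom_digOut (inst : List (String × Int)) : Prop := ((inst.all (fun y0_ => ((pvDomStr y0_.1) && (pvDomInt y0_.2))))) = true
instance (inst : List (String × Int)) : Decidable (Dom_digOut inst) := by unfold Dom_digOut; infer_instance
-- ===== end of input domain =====

-- ===== PORT A =====
-- B differs from A by decomposition: two passes (vertex list, then segments) instead of one stateful loop.
def digOutLoop (inst : List (String × Int)) (x y : Int)
    (vert : List (Int × Int × Int × Int)) (horiz : List (Int × Int × Int)) :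
    (List (Int × Int × Int × Int)) × (List (Int × Int × Int)) :=
  match inst with
  | [] => (vert, horiz)
  | (dir, num) :: rest =>
    if dir == "U" then digOutLoop rest x (y - num) (vert ++ [(x, y - num, y, 1)]) horiz
    else if dir == "D" then digOutLoop rest x (y + num) (vert ++ [(x, y, y + num, 0)]) horiz
    else if dir == "R" then digOutLoop rest (x + num) y vert (horiz ++ [(y, x, x + num)])
    else if dir == "L" then digOutLoop rest (x - num) y vert (horiz ++ [(y, x - num, x)])
    else digOutLoop rest x y vert horiz

def digOut (inst : List (String × Int)) : (List (Int × Int × Int × Int)) × (List (Int × Int × Int)) :=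
  digOutLoop inst 0 0 [] []

-- ===== PORT B =====
-- pass 1 of Source B: the vertex list after the start point
def buildPts (inst : List (String × Int)) (x y : Int) : List (Int × Int) :=
  match inst with
  | [] => []
  | (dir, num) :: rest =>
    let x' := if dir == "R" then x + num else if dir == "L" then x - num else x
    let y' := if dir == "U" then y - num else if dir == "D" then y + num else y
    (x', y') :: buildPts rest x' y'

-- pass 2 of Source B: fold over zip of instructions and consecutive vertex pairs
def segLoop (inst : List (String × Int)) (pts : List (Int × Int))
    (vert : List (Int × Int × Int × Int)) (horiz : List (Int × Int × Int)) :
    (List (Int × Int × Int × Int)) × (List (Int × Int × Int)) :=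
  match inst, pts with
  | (d, _) :: rest, (x0, y0) :: ((x1, y1) :: _ : List (Int × Int)) =>
    if d == "U" then segLoop rest ((x1, y1) :: pts.tail.tail) (vert ++ [(x0, y1, y0, 1)]) horiz
    else if d == "D" then segLoop rest ((x1, y1) :: pts.tail.tail) (vert ++ [(x0, y0, y1, 0)]) horiz
    else if d == "R" then segLoop rest ((x1, y1) :: pts.tail.tail) vert (horiz ++ [(y0, x0, x1)])
    else if d == "L" then segLoop rest ((x1, y1) :: pts.tail.tail) vert (horiz ++ [(y0, x1, x0)])
    else segLoop rest ((x1, y1) :: pts.tail.tail) vert horiz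
  | _, _ => (vert, horiz)

def digOut_alt (inst : List (String × Int)) : (List (Int × Int × Int × Int)) × (List (Int × Int × Int)) :=
  segLoop inst ((0, 0) :: buildPts inst 0 0) [] []

-- ===== PRECONDITION & SPEC =====
def Spec_digOut (inst : List (String × Int)) (out : (List (Int × Int × Int × Int)) × (List (Int × Int × Int))) : Prop := out = digOut_alt inst
instance (inst : List (String × Int)) (out : (List (Int × Int × Int × Int)) × (List (Int × Int × Int))) : Decidable (Spec_digOut inst out) := by unfold Spec_digOut; infer_instance

-- ===== CLAIM (what is proved, stated in full; the proofs are below) =====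
def Claim_equal_digOut : Prop := ∀ (inst : List (String × Int)), Dom_digOut inst → Spec_digOut inst (digOut inst)

-- ===== LEMMAS AND PROOFS =====
theorem loop_eq (inst : List (String × Int)) : ∀ (x y : Int)
    (vert : List (Int × Int × Int × Int)) (horiz : List (Int × Int × Int)),
    digOutLoop inst x y vert horiz = segLoop inst ((x, y) :: buildPts inst x y) vert horiz := by
  induction inst with
  | nil => intro x y vert horiz; rfl
  | cons hd rest ih =>
    intro x y vert horiz
    obtain ⟨dir, num⟩ := hd
    by_cases hU : dir == "U" <;> by_cases hD : dir == "D" <;>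
      by_cases hR : dir == "R" <;> by_cases hL : dir == "L" <;>
      simp_all [digOutLoop, buildPts, segLoop]

-- ===== VERDICT (by name: the statement is the Claim_ definition above) =====
theorem digOut_spec : Claim_equal_digOut := by
  intro inst _
  unfold Spec_digOut digOut digOut_alt
  exact loop_eq inst 0 0 [] []
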